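-- pv_equiv track=rewrite | github.com/tommy780/DNA_designer | random_DNA_sequence_generator.py | secondary_structure
-- ===== SOURCE A (Python) =====
-- import itertools
--
-- def secondary_structure(seq, n, base):
--     if len(seq) < 6:
--         return 1
--
--     seq_count = [(k, len(list(g))) for k, g in itertools.groupby(seq)]
--     for i in range(0, len(seq_count)):
--         if seq_count[i][0] == base:
--             if seq_count[i][1] >= n:
--                 return 0
--     return 1
-- ===== SOURCE B (Python) =====
-- def secondary_structure(seq, n, base):
--     if len(seq) < 6:
--         return 1
--     count = 0
--     for ch in seq:
--         if ch == base:
--             count += 1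
--             if count >= n:
--                 return 0
--         else:
--             count = 0
--     return 1
-- ===== Notes on version B (the rewrite author's own statement) =====
-- stated objective: simpler
-- what changed: Replaces the itertools.groupby run-length table plus index loop with a single fused scan keeping only a running consecutive-count that returns 0 as soon as the count reaches n.
import Mathlib
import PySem

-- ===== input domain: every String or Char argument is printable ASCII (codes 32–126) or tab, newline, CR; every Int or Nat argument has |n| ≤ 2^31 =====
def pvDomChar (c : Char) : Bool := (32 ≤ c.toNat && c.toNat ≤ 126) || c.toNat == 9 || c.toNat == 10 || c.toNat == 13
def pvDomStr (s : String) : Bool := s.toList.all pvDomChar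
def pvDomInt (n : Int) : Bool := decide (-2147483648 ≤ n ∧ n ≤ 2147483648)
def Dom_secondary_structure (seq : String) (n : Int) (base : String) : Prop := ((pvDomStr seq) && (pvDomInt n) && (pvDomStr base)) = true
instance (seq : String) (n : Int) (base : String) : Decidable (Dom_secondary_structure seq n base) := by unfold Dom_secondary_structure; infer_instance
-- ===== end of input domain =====

-- B replaces A's groupby run-length table and index loop with one fused scan keeping a
-- running consecutive-count (objective: simpler).

-- ===== PORT A =====
-- itertools.groupby over the characters, as (key, run length) pairs
def pvGroupby : List Char → List (Char × Nat)
  | [] => []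
  | c :: rest =>
      (c, (rest.takeWhile (fun x => x == c)).length + 1) ::
        pvGroupby (rest.dropWhile (fun x => x == c))
termination_by l => l.length
decreasing_by
  exact Nat.lt_succ_of_le (List.length_dropWhile_le _ _)

-- the 'for i in range(0, len(seq_count))' loop with its two nested ifs
def pvScanA (n : Int) (base : String) : List (Char × Nat) → Int
  | [] => 1
  | (k, len) :: rest =>
      if [k] = base.toList then
        if (len : Int) ≥ n then 0 else pvScanA n base rest
      else pvScanA n base rest

def secondary_structure (seq : String) (n : Int) (base : String) : Int :=
  if PySem.Str.len seq < 6 then 1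
  else pvScanA n base (pvGroupby seq.toList)

-- ===== PORT B =====
-- single pass with a running consecutive-count
def pvLoopB (n : Int) (base : String) : List Char → Int → Int
  | [], _ => 1
  | c :: rest, count =>
      if [c] = base.toList then
        if count + 1 ≥ n then 0 else pvLoopB n base rest (count + 1)
      else pvLoopB n base rest 0

def secondary_structure_alt (seq : String) (n : Int) (base : String) : Int :=
  if PySem.Str.len seq < 6 then 1
  else pvLoopB n base seq.toList 0

-- ===== PRECONDITION & SPEC =====
def Spec_secondary_structure (seq : String) (n : Int) (base : String) (out : Int) : Prop := out = secondary_structure_alt seq n base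
instance (seq : String) (n : Int) (base : String) (out : Int) : Decidable (Spec_secondary_structure seq n base out) := by unfold Spec_secondary_structure; infer_instance

-- ===== CLAIM (what is proved, stated in full; the proofs are below) =====
def Claim_equal_secondary_structure : Prop := ∀ (seq : String) (n : Int) (base : String), Dom_secondary_structure seq n base → Spec_secondary_structure seq n base (secondary_structure seq n base)

-- ===== LEMMAS AND PROOFS =====

-- after a maximal run the next character differs, so B's counter is reset: the count argument is irrelevant
theorem pvLoopB_dropWhile (n : Int) (base : String) (c : Char) (h : [c] = base.toList) :
    ∀ (r : List Char) (k : Int),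
      pvLoopB n base (r.dropWhile (fun x => x == c)) k
        = pvLoopB n base (r.dropWhile (fun x => x == c)) 0 := by
  intro r
  induction r with
  | nil => intro k; rfl
  | cons x t ih =>
      intro k
      by_cases hx : x = c
      · simp [hx, ih]
      · have hb : ¬ ([x] = base.toList) := by
          rw [← h]; simp [hx]
        simp [hx, pvLoopB, hb]

-- scanning a run of the matched base starting from count k < n
theorem pvLoopB_run (n : Int) (base : String) (c : Char) (h : [c] = base.toList) :
    ∀ (run r : List Char) (k : Int), (∀ x ∈ run, x = c) → k < n →
      pvLoopB n base (run ++ r) k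
        = if k + (run.length : Int) ≥ n then 0 else pvLoopB n base r (k + run.length) := by
  intro run
  induction run with
  | nil =>
      intro r k _ hk
      simp only [List.nil_append, List.length_nil, Nat.cast_zero, add_zero]
      rw [if_neg (by omega)]
  | cons x t ih =>
      intro r k hall hk
      have hx : x = c := hall x (by simp)
      subst hx
      simp only [List.cons_append, pvLoopB]
      rw [if_pos h]
      by_cases h1 : k + 1 ≥ n
      · rw [if_pos h1,
          if_pos (show k + ((x :: t).length : Int) ≥ n by
            simp only [List.length_cons]; push_cast; omega)]
      · rw [if_neg h1, ih r (k + 1) (fun y hy => hall y (List.mem_cons_of_mem _ hy)) (by omega)]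
        have he : k + ((x :: t).length : Int) = k + 1 + (t.length : Int) := by
          simp only [List.length_cons]; push_cast; ring
        rw [he]

-- scanning a run of a non-matching character leaves the count at 0
theorem pvLoopB_skip (n : Int) (base : String) (c : Char) (h : ¬ ([c] = base.toList)) :
    ∀ (run r : List Char), (∀ x ∈ run, x = c) →
      pvLoopB n base (run ++ r) 0 = pvLoopB n base r 0 := by
  intro run
  induction run with
  | nil => intro r _; rfl
  | cons x t ih =>
      intro r hall
      have hx : x = c := hall x (by simp)
      subst hx
      simp only [List.cons_append, pvLoopB]
      rw [if_neg h]
      exact ih r (fun y hy => hall y (List.mem_cons_of_mem _ hy))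

theorem pv_main (n : Int) (base : String) :
    ∀ (N : Nat) (l : List Char), l.length ≤ N →
      pvScanA n base (pvGroupby l) = pvLoopB n base l 0 := by
  intro N
  induction N with
  | zero =>
      intro l hl
      have hnil : l = [] := List.length_eq_zero_iff.mp (Nat.le_zero.mp hl)
      subst hnil
      simp [pvGroupby, pvScanA, pvLoopB]
  | succ N ih =>
      intro l hl
      cases l with
      | nil => simp [pvGroupby, pvScanA, pvLoopB]
      | cons c rest =>
          have hsplit : rest.takeWhile (fun x => x == c) ++ rest.dropWhile (fun x => x == c) = rest :=
            List.takeWhile_append_dropWhile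
          have hlen : (rest.dropWhile (fun x => x == c)).length ≤ N := by
            have := List.length_dropWhile_le (fun x => x == c) rest
            simp only [List.length_cons] at hl
            omega
          have hallrun : ∀ x ∈ rest.takeWhile (fun x => x == c), x = c := by
            intro x hx
            simpa using List.mem_takeWhile_imp hx
          rw [pvGroupby]
          simp only [pvScanA, pvLoopB]
          by_cases hb : [c] = base.toList
          · rw [if_pos hb, if_pos hb]
            by_cases h1 : (0 : Int) + 1 ≥ n
            · rw [if_pos h1,
                if_pos (show (((rest.takeWhile (fun x => x == c)).length + 1 : Nat) : Int) ≥ n by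
                  push_cast; omega)]
            · rw [if_neg h1]
              conv_rhs => rw [← hsplit]
              rw [pvLoopB_run n base c hb _ _ (0 + 1) hallrun (by omega)]
              by_cases h2 : (((rest.takeWhile (fun x => x == c)).length + 1 : Nat) : Int) ≥ n
              · rw [if_pos h2, if_pos (by push_cast at h2 ⊢; omega)]
              · rw [if_neg h2, if_neg (by push_cast at h2 ⊢; omega),
                  pvLoopB_dropWhile n base c hb]
                exact ih _ hlen
          · rw [if_neg hb, if_neg hb]
            conv_rhs => rw [← hsplit]
            rw [pvLoopB_skip n base c hb _ _ hallrun]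
            exact ih _ hlen

-- ===== VERDICT (by name: the statement is the Claim_ definition above) =====
theorem secondary_structure_spec : Claim_equal_secondary_structure := by
  intro seq n base _
  unfold Spec_secondary_structure secondary_structure secondary_structure_alt
  split_ifs with h
  · rfl
  · exact pv_main n base seq.toList.length seq.toList le_rfl
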